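-- pv_equiv track=rewrite | github.com/mbrosenuw/pyrotations | rotham.py | getrotblocks
-- ===== SOURCE A (Python) =====
-- def getrotblocks(basis):
--     blocks = {}
--     for idx, (j,k, gamma) in enumerate(basis):
--         if (j,gamma) not in blocks:
--             blocks[(j,gamma)] = {"start": idx, "end": idx, "count": 1}
--         else:
--             blocks[(j,gamma)]["end"] = idx
--             blocks[(j,gamma)]["count"] += 1
--     return blocks
-- ===== SOURCE B (Python) =====
-- def _hits(basis, key):
--     return [i for i, (j, k, g) in enumerate(basis) if (j, g) == key]
--
-- def getrotblocks(basis):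
--     keys = []
--     for j, k, gamma in basis:
--         if (j, gamma) not in keys:
--             keys.append((j, gamma))
--     result = {}
--     for key in keys:
--         hits = _hits(basis, key)
--         result[key] = {"start": hits[0], "end": hits[-1], "count": len(hits)}
--     return result
-- ===== Notes on version B (the rewrite author's own statement) =====
-- stated objective: alternative
-- what changed: B abandons A's single-pass running-aggregate dict entirely: it first discovers the distinct (j,gamma) keys in order of first appearance, then for each key re-scans the basis to collect that key's index list and reads start/end/count off it (nested per-key scans, O(n*k), instead of A's one-pass O(n) aggregation).
import Mathlib
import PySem

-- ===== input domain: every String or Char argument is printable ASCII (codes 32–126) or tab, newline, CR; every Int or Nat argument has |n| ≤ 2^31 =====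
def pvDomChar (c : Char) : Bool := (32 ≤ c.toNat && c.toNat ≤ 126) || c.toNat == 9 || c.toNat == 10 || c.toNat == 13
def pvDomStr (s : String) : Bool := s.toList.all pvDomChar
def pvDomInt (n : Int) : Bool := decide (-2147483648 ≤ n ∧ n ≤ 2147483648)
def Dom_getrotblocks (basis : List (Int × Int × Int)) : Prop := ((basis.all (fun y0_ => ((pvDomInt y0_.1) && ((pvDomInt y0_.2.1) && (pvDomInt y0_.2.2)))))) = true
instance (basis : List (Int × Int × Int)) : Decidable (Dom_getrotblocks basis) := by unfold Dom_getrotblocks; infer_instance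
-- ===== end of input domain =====

-- B drops A's one-pass running-aggregate dict for a key-discovery pass followed by one
-- brute-force re-scan of the basis per distinct (j,gamma) key; alternative algorithm, not faster.

-- ===== PORT A =====
-- one loop iteration of A: conditional insert of a fresh block / in-place update of end and count
def getrotblocksStepA (blocks : PySem.Dict (Int × Int) (PySem.Dict String Int))
    (p : Int × (Int × Int × Int)) : PySem.Dict (Int × Int) (PySem.Dict String Int) :=
  let idx := p.1
  let j := p.2.1
  let gamma := p.2.2.2
  if blocks.contains (j, gamma) = false then
    blocks.insert (j, gamma)
      (PySem.Dict.ofList [("start", idx), ("end", idx), ("count", 1)])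
  else
    -- blocks[(j,gamma)]["end"] = idx ; blocks[(j,gamma)]["count"] += 1   (in-place mutation of the inner dict)
    blocks.modify (j, gamma) PySem.Dict.empty
      (fun d => (d.insert "end" idx).modify "count" 0 (· + 1))

def getrotblocks (basis : List (Int × Int × Int)) : List (Int × Int × List (String × Int)) :=
  ((PySem.List.enumerate basis).foldl getrotblocksStepA PySem.Dict.empty).items.map
    (fun q => (q.1.1, q.1.2, q.2.items))

-- ===== PORT B =====
-- _hits(basis, key): the index list of every entry of basis whose (j,gamma) equals key
def getrotblocksHits (basis : List (Int × Int × Int)) (key : Int × Int) : List Int :=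
  ((PySem.List.enumerate basis).filter (fun p => (p.2.1, p.2.2.2) == key)).map (·.1)

-- key-discovery pass: distinct (j,gamma) in order of first appearance
def getrotblocksKeys (basis : List (Int × Int × Int)) : List (Int × Int) :=
  basis.foldl (fun ks t => if ks.contains (t.1, t.2.2) then ks else ks ++ [(t.1, t.2.2)]) []

def getrotblocks_alt (basis : List (Int × Int × Int)) : List (Int × Int × List (String × Int)) :=
  -- hits[0] / hits[-1]: every hit list of a discovered key is nonempty, so headD/getLastD are exact here
  ((getrotblocksKeys basis).foldl
      (fun (res : PySem.Dict (Int × Int) (PySem.Dict String Int)) key =>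
        let hits := getrotblocksHits basis key
        res.insert key (PySem.Dict.ofList
          [("start", hits.headD 0), ("end", hits.getLastD 0), ("count", (hits.length : Int))]))
      PySem.Dict.empty).items.map (fun q => (q.1.1, q.1.2, q.2.items))

-- ===== PRECONDITION & SPEC =====
def Spec_getrotblocks (basis : List (Int × Int × Int)) (out : List (Int × Int × List (String × Int))) : Prop := out = getrotblocks_alt basis
instance (basis : List (Int × Int × Int)) (out : List (Int × Int × List (String × Int))) : Decidable (Spec_getrotblocks basis out) := by unfold Spec_getrotblocks; infer_instance

-- ===== CLAIM (what is proved, stated in full; the proofs are below) =====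
def Claim_equal_getrotblocks : Prop := ∀ (basis : List (Int × Int × Int)), Dom_getrotblocks basis → Spec_getrotblocks basis (getrotblocks basis)

-- ===== LEMMAS AND PROOFS =====

-- A's block value as a function of the index list of a key
def blockOf (xs : List Int) : PySem.Dict String Int :=
  PySem.Dict.ofList [("start", xs.headD 0), ("end", xs.getLastD 0), ("count", (xs.length : Int))]

-- keysP / hitsP: B's two quantities, expressed over the enumerated pair list (for induction)
def keysP (l : List (Int × (Int × Int × Int))) : List (Int × Int) :=
  l.foldl (fun ks p => if ks.contains (p.2.1, p.2.2.2) then ks else ks ++ [(p.2.1, p.2.2.2)]) []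

def hitsP (l : List (Int × (Int × Int × Int))) (k : Int × Int) : List Int :=
  (l.filter (fun p => (p.2.1, p.2.2.2) == k)).map (·.1)

lemma keysP_enumerate (basis : List (Int × Int × Int)) :
    keysP (PySem.List.enumerate basis) = getrotblocksKeys basis := by
  unfold keysP getrotblocksKeys
  conv_rhs => rw [← PySem.List.map_snd_enumerate basis 0]
  rw [List.foldl_map]

lemma hitsP_enumerate (basis : List (Int × Int × Int)) (k : Int × Int) :
    hitsP (PySem.List.enumerate basis) k = getrotblocksHits basis k := rfl

lemma nodup_keysP (l : List (Int × (Int × Int × Int))) : (keysP l).Nodup := by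
  suffices h : ∀ (l : List (Int × (Int × Int × Int))) (ks : List (Int × Int)), ks.Nodup →
      (l.foldl (fun ks p => if ks.contains (p.2.1, p.2.2.2) then ks else ks ++ [(p.2.1, p.2.2.2)]) ks).Nodup by
    exact h l [] List.nodup_nil
  intro l
  induction l with
  | nil => intro ks h; exact h
  | cons p l ih =>
    intro ks h
    simp only [List.foldl_cons]
    split
    · exact ih ks h
    · next hc =>
      refine ih _ (List.nodup_append.2 ⟨h, List.nodup_singleton _, ?_⟩)
      intro a ha b hb
      simp only [List.mem_singleton] at hb
      subst hb
      intro hab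
      subst hab
      exact absurd ((List.contains_iff_mem).2 ha) (by simp_all)

lemma block_step (xs : List Int) (hx : xs ≠ []) (idx : Int) :
    ((blockOf xs).insert "end" idx).modify "count" 0 (· + 1) = blockOf (xs ++ [idx]) := by
  obtain ⟨a, t, rfl⟩ := List.exists_cons_of_ne_nil hx
  have hcore : ∀ h e n i : Int,
      ((PySem.Dict.ofList [("start", h), ("end", e), ("count", n)]).insert "end" i).modify
          "count" 0 (· + 1)
        = PySem.Dict.ofList [("start", h), ("end", i), ("count", n + 1)] := fun _ _ _ _ => rfl
  unfold blockOf
  rw [hcore]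
  have h2 : ((a :: t) ++ [idx]).getLastD 0 = idx := by
    rw [List.getLastD_eq_getLast?, List.getLast?_concat]; rfl
  have h3 : (((a :: t) ++ [idx]).length : Int) = ((a :: t).length : Int) + 1 := by simp
  rw [h2, h3, List.cons_append, List.headD_cons, List.headD_cons]

-- the characterisation of A's loop state after processing the pair list l
lemma invA (l : List (Int × (Int × Int × Int))) :
    (l.foldl getrotblocksStepA PySem.Dict.empty).keys = keysP l ∧
    ∀ k, (l.foldl getrotblocksStepA PySem.Dict.empty).get? k =
      if hitsP l k = [] then none else some (blockOf (hitsP l k)) := by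
  induction l using List.reverseRecOn with
  | nil =>
    exact ⟨rfl, fun k => by simp [PySem.Dict.get?_empty, hitsP]⟩
  | append_singleton l p ih =>
    obtain ⟨hk, hv⟩ := ih
    set d := l.foldl getrotblocksStepA PySem.Dict.empty with hd
    have hfold : (l ++ [p]).foldl getrotblocksStepA PySem.Dict.empty = getrotblocksStepA d p := by
      rw [List.foldl_append]; rfl
    have hkeysP : keysP (l ++ [p]) =
        if (keysP l).contains (p.2.1, p.2.2.2) then keysP l else keysP l ++ [(p.2.1, p.2.2.2)] := by
      unfold keysP; rw [List.foldl_append]; rfl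
    have hhitsP : ∀ k, hitsP (l ++ [p]) k =
        hitsP l k ++ (if ((p.2.1, p.2.2.2) == k) = true then [p.1] else []) := by
      intro k
      unfold hitsP
      rw [List.filter_append, List.map_append]
      congr 1
      by_cases hb : ((p.2.1, p.2.2.2) == k) = true <;> simp [hb]
    have hcontkeys : (keysP l).contains (p.2.1, p.2.2.2) = d.contains (p.2.1, p.2.2.2) := by
      rw [PySem.Dict.contains_eq_decide_mem_keys, hk]
      cases hcl : (keysP l).contains (p.2.1, p.2.2.2)
      · simp at hcl; simp [hcl]
      · simp at hcl; simp [hcl]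
    by_cases h : hitsP l (p.2.1, p.2.2.2) = []
    · -- key not yet seen: fresh insert
      have hcd : d.contains (p.2.1, p.2.2.2) = false := by
        rw [PySem.Dict.contains_eq_isSome_get?, hv, if_pos h]; rfl
      have hA : getrotblocksStepA d p
          = d.insert (p.2.1, p.2.2.2) (blockOf [p.1]) := by
        simp only [getrotblocksStepA, hcd]
        rw [if_pos trivial]
        rfl
      constructor
      · rw [hfold, hA, PySem.Dict.keys_insert_of_not_contains d _ hcd, hkeysP,
          hcontkeys, hcd, if_neg (by simp), hk]
      · intro k
        rw [hfold, hA, PySem.Dict.get?_insert, hhitsP k]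
        by_cases hkk : k = (p.2.1, p.2.2.2)
        · subst hkk
          simp [h]
        · have hb : ((p.2.1, p.2.2.2) == k) = false := by
            simp; exact fun hh => hkk hh.symm
          simp [hkk, hb, hv]
    · -- key already present: in-place update
      have hcd : d.contains (p.2.1, p.2.2.2) = true := by
        rw [PySem.Dict.contains_eq_isSome_get?, hv, if_neg h]; rfl
      have hgetD : d.getD (p.2.1, p.2.2.2) PySem.Dict.empty = blockOf (hitsP l (p.2.1, p.2.2.2)) := by
        rw [PySem.Dict.getD_eq_get?_getD, hv, if_neg h]; rfl
      have hmod : ∀ (dd : PySem.Dict (Int × Int) (PySem.Dict String Int)) k d0 f,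
          dd.modify k d0 f = dd.insert k (f (dd.getD k d0)) := fun _ _ _ _ => rfl
      have hA : getrotblocksStepA d p
          = d.insert (p.2.1, p.2.2.2) (blockOf (hitsP l (p.2.1, p.2.2.2) ++ [p.1])) := by
        simp only [getrotblocksStepA, hcd]
        rw [if_neg (by simp), hmod, hgetD, block_step _ h p.1]
      constructor
      · rw [hfold, hA, PySem.Dict.keys_insert_of_contains d _ hcd, hkeysP,
          hcontkeys, hcd, if_pos rfl, hk]
      · intro k
        rw [hfold, hA, PySem.Dict.get?_insert, hhitsP k]
        by_cases hkk : k = (p.2.1, p.2.2.2)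
        · subst hkk
          simp [h]
        · have hb : ((p.2.1, p.2.2.2) == k) = false := by
            simp; exact fun hh => hkk hh.symm
          simp [hkk, hb, hv]

-- B's dict is built by inserting each discovered key exactly once
lemma items_B (basis : List (Int × Int × Int)) :
    ((getrotblocksKeys basis).foldl
      (fun (res : PySem.Dict (Int × Int) (PySem.Dict String Int)) key =>
        let hits := getrotblocksHits basis key
        res.insert key (PySem.Dict.ofList
          [("start", hits.headD 0), ("end", hits.getLastD 0), ("count", (hits.length : Int))]))
      PySem.Dict.empty).items
    = (getrotblocksKeys basis).map (fun k => (k, blockOf (getrotblocksHits basis k))) := by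
  have h := PySem.Dict.items_foldl_insert_fresh (l := getrotblocksKeys basis)
    (k := fun k => k) (v := fun k => blockOf (getrotblocksHits basis k))
    (d := PySem.Dict.empty)
    (by intro a _; exact PySem.Dict.contains_empty a)
    (by simp only [List.map_id']; rw [← keysP_enumerate]; exact nodup_keysP _)
  simpa [blockOf] using h

-- ===== VERDICT (by name: the statement is the Claim_ definition above) =====
theorem getrotblocks_spec : Claim_equal_getrotblocks := by
  intro basis _
  unfold Spec_getrotblocks getrotblocks getrotblocks_alt
  obtain ⟨hk, hv⟩ := invA (PySem.List.enumerate basis)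
  have hnd : ((PySem.List.enumerate basis).foldl getrotblocksStepA PySem.Dict.empty).keys.Nodup := by
    rw [hk]; exact nodup_keysP _
  rw [PySem.Dict.items_eq_map_keys _ hnd PySem.Dict.empty, items_B, hk, keysP_enumerate,
    List.map_map, List.map_map]
  apply List.map_congr_left
  intro k hkmem
  have hmem : k ∈ ((PySem.List.enumerate basis).foldl getrotblocksStepA PySem.Dict.empty).keys := by
    rw [hk, keysP_enumerate]; exact hkmem
  have hne : hitsP (PySem.List.enumerate basis) k ≠ [] := by
    intro hnil
    have : ((PySem.List.enumerate basis).foldl getrotblocksStepA PySem.Dict.empty).get? k = none := by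
      rw [hv, if_pos hnil]
    exact ((PySem.Dict.get?_eq_none_iff_not_mem_keys _ _).1 this) hmem
  have hgd : ((PySem.List.enumerate basis).foldl getrotblocksStepA PySem.Dict.empty).getD k PySem.Dict.empty
      = blockOf (getrotblocksHits basis k) := by
    rw [PySem.Dict.getD_eq_get?_getD, hv, if_neg hne, hitsP_enumerate]; rfl
  simp only [Function.comp, hgd]
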